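-- pv_equiv track=rewrite | github.com/sanketvalunj/garud-drishti-soc | garud_drishti/ai_engine/playbook/playbook_generator.py | _synthesize_playbook_report_text
-- ===== SOURCE A (Python) =====
-- from typing import Any, Optional
--
-- def _synthesize_playbook_report_text(
--     title: str,
--     overview: str,
--     severity: str,
--     reason: str,
--     key_indicators: list[str],
--     steps: list[dict[str, Any]],
--     automation_candidates: list[str],
--     analyst_notes: str,
-- ) -> str:
--     """Full multi-section report for persistence and jsPDF when the LLM omits playbook_report."""
--
--     def _by_phase(ph: str) -> list[str]:
--         out: list[str] = []
--         for s in steps: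
--             if str(s.get("phase") or "") != ph:
--                 continue
--             p = str(s.get("purpose") or "").strip()
--             a = str(s.get("action") or "").strip()
--             if p and a:
--                 out.append(f"{p} (action: {a})")
--             elif p:
--                 out.append(p)
--             elif a:
--                 out.append(a)
--         return out
--
--     inv = _by_phase("INVESTIGATION_STEPS")
--     con = _by_phase("CONTAINMENT_ACTIONS")
--     era = _by_phase("ERADICATION_ACTIONS")
--     rec = _by_phase("RECOVERY_STEPS")
--
--     lines: list[str] = [
--         f"SOC Incident Response Playbook: {title}",
--         "",
--         "INCIDENT OVERVIEW",
--         overview or "(No overview text.)",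
--         "",
--         "RISK ASSESSMENT",
--         f"Severity: {severity or 'unknown'}",
--         f"Reason: {reason or 'unknown'}",
--         "",
--         "KEY INDICATORS",
--     ]
--     if key_indicators:
--         for k in key_indicators:
--             lines.append(f"- {k}")
--     else:
--         lines.append("- (None listed)")
--     lines.extend(["", "INVESTIGATION STEPS"])
--     if inv:
--         for i, s in enumerate(inv, 1):
--             lines.append(f"{i}. {s}")
--     else:
--         lines.append("1. (No investigation steps.)")
--     lines.extend(["", "CONTAINMENT ACTIONS"])
--     for s in con or ["(No containment actions.)"]:
--         lines.append(f"- {s}")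
--     lines.extend(["", "ERADICATION ACTIONS"])
--     for s in era or ["(No eradication actions.)"]:
--         lines.append(f"- {s}")
--     lines.extend(["", "RECOVERY STEPS"])
--     for s in rec or ["(No recovery steps.)"]:
--         lines.append(f"- {s}")
--     lines.extend(["", "AUTOMATION OPPORTUNITIES"])
--     if automation_candidates:
--         for a in automation_candidates:
--             lines.append(f"- {a}")
--     else:
--         lines.append("- (None listed)")
--     lines.extend(["", "ANALYST NOTES", analyst_notes or "(None)"])
--     return "\n".join(lines)
-- ===== SOURCE B (Python) =====
-- def _synthesize_playbook_report_text(
--     title,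
--     overview,
--     severity,
--     reason,
--     key_indicators,
--     steps,
--     automation_candidates,
--     analyst_notes,
-- ):
--     """One grouping pass over steps; the report is assembled as section blocks joined by blank lines."""
--
--     groups = {}
--     for s in steps:
--         p = str(s.get("purpose") or "").strip()
--         a = str(s.get("action") or "").strip()
--         if p and a:
--             desc = p + " (action: " + a + ")"
--         else:
--             desc = p or a
--         if desc:
--             groups.setdefault(str(s.get("phase") or ""), []).append(desc)
--
--     def bullets(items, empty):
--         return "\n".join("- " + x for x in (items if items else [empty]))
--
--     inv = groups.get("INVESTIGATION_STEPS", [])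
--     blocks = [
--         "SOC Incident Response Playbook: " + title,
--         "INCIDENT OVERVIEW" + "\n" + (overview or "(No overview text.)"),
--         "RISK ASSESSMENT" + "\n" + "Severity: " + (severity or "unknown")
--             + "\n" + "Reason: " + (reason or "unknown"),
--         "KEY INDICATORS" + "\n"
--             + ("\n".join("- " + k for k in key_indicators) if key_indicators else "- (None listed)"),
--         "INVESTIGATION STEPS" + "\n"
--             + ("\n".join(f"{i}. {s}" for i, s in enumerate(inv, 1)) if inv else "1. (No investigation steps.)"),
--         "CONTAINMENT ACTIONS" + "\n" + bullets(groups.get("CONTAINMENT_ACTIONS", []), "(No containment actions.)"),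
--         "ERADICATION ACTIONS" + "\n" + bullets(groups.get("ERADICATION_ACTIONS", []), "(No eradication actions.)"),
--         "RECOVERY STEPS" + "\n" + bullets(groups.get("RECOVERY_STEPS", []), "(No recovery steps.)"),
--         "AUTOMATION OPPORTUNITIES" + "\n"
--             + ("\n".join("- " + a for a in automation_candidates) if automation_candidates else "- (None listed)"),
--         "ANALYST NOTES" + "\n" + (analyst_notes or "(None)"),
--     ]
--     return "\n\n".join(blocks)
-- ===== Notes on version B (the rewrite author's own statement) =====
-- stated objective: alternative
-- what changed: B replaces A's four separate scans of steps (one per phase) with a single grouping pass into a phase-keyed dict, and replaces A's imperative flat lines-list construction joined by '\n' with building whole section-block strings (header + body) joined by blank lines ('\n\n').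
import Mathlib
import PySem

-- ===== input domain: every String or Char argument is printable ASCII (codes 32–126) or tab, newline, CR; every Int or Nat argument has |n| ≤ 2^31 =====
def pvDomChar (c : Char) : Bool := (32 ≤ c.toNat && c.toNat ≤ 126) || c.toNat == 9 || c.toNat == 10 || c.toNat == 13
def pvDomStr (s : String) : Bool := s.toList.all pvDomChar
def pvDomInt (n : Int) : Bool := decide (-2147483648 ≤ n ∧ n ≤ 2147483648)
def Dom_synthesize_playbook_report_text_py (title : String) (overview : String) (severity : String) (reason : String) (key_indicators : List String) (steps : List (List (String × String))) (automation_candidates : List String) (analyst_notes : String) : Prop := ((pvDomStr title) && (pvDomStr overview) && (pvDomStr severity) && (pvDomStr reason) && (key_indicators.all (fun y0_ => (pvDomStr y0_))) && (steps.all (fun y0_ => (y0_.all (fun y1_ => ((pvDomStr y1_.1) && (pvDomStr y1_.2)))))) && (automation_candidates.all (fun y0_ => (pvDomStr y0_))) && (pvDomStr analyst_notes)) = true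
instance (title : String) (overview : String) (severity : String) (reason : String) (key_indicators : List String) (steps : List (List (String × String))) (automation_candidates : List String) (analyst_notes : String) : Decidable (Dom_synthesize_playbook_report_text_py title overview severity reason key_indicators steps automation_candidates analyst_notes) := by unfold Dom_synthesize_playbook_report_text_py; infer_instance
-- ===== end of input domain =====

-- B groups the steps by phase in ONE recursive pass (A scans `steps` once per phase, four times)
-- and assembles the report as whole section-block strings joined by blank lines, instead of A's
-- imperative append-by-append construction of a flat `lines` list.

-- ===== PORT A =====
-- A's inner helper `_by_phase`: one scan of `steps` keeping entries of phase `ph`.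
def pvByPhase (steps : List (List (String × String))) (ph : String) : List String :=
  steps.foldl (fun out s =>
    let d := PySem.Dict.ofList s
    if ((d.get? "phase").getD "") ≠ ph then out
    else
      let p := PySem.Str.strip ((d.get? "purpose").getD "")
      let a := PySem.Str.strip ((d.get? "action").getD "")
      if p ≠ "" ∧ a ≠ "" then out ++ [p ++ " (action: " ++ a ++ ")"]
      else if p ≠ "" then out ++ [p]
      else if a ≠ "" then out ++ [a]
      else out) []

def synthesize_playbook_report_text_py (title : String) (overview : String) (severity : String) (reason : String) (key_indicators : List String) (steps : List (List (String × String))) (automation_candidates : List String) (analyst_notes : String) : String :=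
  let inv := pvByPhase steps "INVESTIGATION_STEPS"
  let con := pvByPhase steps "CONTAINMENT_ACTIONS"
  let era := pvByPhase steps "ERADICATION_ACTIONS"
  let rcv := pvByPhase steps "RECOVERY_STEPS"
  let lines : List String :=
    ["SOC Incident Response Playbook: " ++ title, "", "INCIDENT OVERVIEW",
     if overview ≠ "" then overview else "(No overview text.)", "", "RISK ASSESSMENT",
     "Severity: " ++ (if severity ≠ "" then severity else "unknown"),
     "Reason: " ++ (if reason ≠ "" then reason else "unknown"), "", "KEY INDICATORS"]
  let lines := if key_indicators ≠ [] then
      key_indicators.foldl (fun l k => l ++ ["- " ++ k]) lines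
    else lines ++ ["- (None listed)"]
  let lines := lines ++ ["", "INVESTIGATION STEPS"]
  let lines := if inv ≠ [] then
      (PySem.List.enumerate inv 1).foldl (fun l is => l ++ [PySem.Int.toStr is.1 ++ ". " ++ is.2]) lines
    else lines ++ ["1. (No investigation steps.)"]
  let lines := lines ++ ["", "CONTAINMENT ACTIONS"]
  let lines := (if con ≠ [] then con else ["(No containment actions.)"]).foldl (fun l s => l ++ ["- " ++ s]) lines
  let lines := lines ++ ["", "ERADICATION ACTIONS"]
  let lines := (if era ≠ [] then era else ["(No eradication actions.)"]).foldl (fun l s => l ++ ["- " ++ s]) lines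
  let lines := lines ++ ["", "RECOVERY STEPS"]
  let lines := (if rcv ≠ [] then rcv else ["(No recovery steps.)"]).foldl (fun l s => l ++ ["- " ++ s]) lines
  let lines := lines ++ ["", "AUTOMATION OPPORTUNITIES"]
  let lines := if automation_candidates ≠ [] then
      automation_candidates.foldl (fun l a => l ++ ["- " ++ a]) lines
    else lines ++ ["- (None listed)"]
  let lines := lines ++ ["", "ANALYST NOTES", if analyst_notes ≠ "" then analyst_notes else "(None)"]
  PySem.Str.join "\n" lines

-- ===== PORT B =====
-- B's single recursive grouping pass over the steps ('for s in steps: groups.setdefault(...).append(...)').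
def pvGroupRec : List (List (String × String)) → PySem.Dict String (List String) → PySem.Dict String (List String)
  | [], g => g
  | s :: rest, g =>
      let d := PySem.Dict.ofList s
      let p := PySem.Str.strip ((d.get? "purpose").getD "")
      let a := PySem.Str.strip ((d.get? "action").getD "")
      let desc := if p ≠ "" ∧ a ≠ "" then p ++ " (action: " ++ a ++ ")" else if p ≠ "" then p else a
      pvGroupRec rest (if desc ≠ "" then g.modify ((d.get? "phase").getD "") [] (· ++ [desc]) else g)

-- Source B's `bullets(items, empty)`.
def pvBullets (items : List String) (empty : String) : String :=
  PySem.Str.join "\n" ((match items with | [] => [empty] | l => l).map (fun x => "- " ++ x))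

def synthesize_playbook_report_text_py_alt (title : String) (overview : String) (severity : String) (reason : String) (key_indicators : List String) (steps : List (List (String × String))) (automation_candidates : List String) (analyst_notes : String) : String :=
  let groups := pvGroupRec steps PySem.Dict.empty
  let inv := groups.getD "INVESTIGATION_STEPS" []
  let blocks : List String :=
    ["SOC Incident Response Playbook: " ++ title,
     "INCIDENT OVERVIEW" ++ "\n" ++ (if overview ≠ "" then overview else "(No overview text.)"),
     "RISK ASSESSMENT" ++ "\n" ++ "Severity: " ++ (if severity ≠ "" then severity else "unknown")
       ++ "\n" ++ "Reason: " ++ (if reason ≠ "" then reason else "unknown"),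
     "KEY INDICATORS" ++ "\n"
       ++ (if key_indicators ≠ [] then PySem.Str.join "\n" (key_indicators.map (fun k => "- " ++ k))
           else "- (None listed)"),
     "INVESTIGATION STEPS" ++ "\n"
       ++ (if inv ≠ [] then
             PySem.Str.join "\n" ((PySem.List.enumerate inv 1).map (fun is => PySem.Int.toStr is.1 ++ ". " ++ is.2))
           else "1. (No investigation steps.)"),
     "CONTAINMENT ACTIONS" ++ "\n" ++ pvBullets (groups.getD "CONTAINMENT_ACTIONS" []) "(No containment actions.)",
     "ERADICATION ACTIONS" ++ "\n" ++ pvBullets (groups.getD "ERADICATION_ACTIONS" []) "(No eradication actions.)",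
     "RECOVERY STEPS" ++ "\n" ++ pvBullets (groups.getD "RECOVERY_STEPS" []) "(No recovery steps.)",
     "AUTOMATION OPPORTUNITIES" ++ "\n"
       ++ (if automation_candidates ≠ [] then PySem.Str.join "\n" (automation_candidates.map (fun a => "- " ++ a))
           else "- (None listed)"),
     "ANALYST NOTES" ++ "\n" ++ (if analyst_notes ≠ "" then analyst_notes else "(None)")]
  PySem.Str.join "\n\n" blocks

-- ===== PRECONDITION & SPEC =====
def Spec_synthesize_playbook_report_text_py (title : String) (overview : String) (severity : String) (reason : String) (key_indicators : List String) (steps : List (List (String × String))) (automation_candidates : List String) (analyst_notes : String) (out : String) : Prop := out = synthesize_playbook_report_text_py_alt title overview severity reason key_indicators steps automation_candidates analyst_notes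
instance (title : String) (overview : String) (severity : String) (reason : String) (key_indicators : List String) (steps : List (List (String × String))) (automation_candidates : List String) (analyst_notes : String) (out : String) : Decidable (Spec_synthesize_playbook_report_text_py title overview severity reason key_indicators steps automation_candidates analyst_notes out) := by unfold Spec_synthesize_playbook_report_text_py; infer_instance

-- ===== CLAIM (what is proved, stated in full; the proofs are below) =====
def Claim_equal_synthesize_playbook_report_text_py : Prop := ∀ (title : String) (overview : String) (severity : String) (reason : String) (key_indicators : List String) (steps : List (List (String × String))) (automation_candidates : List String) (analyst_notes : String), Dom_synthesize_playbook_report_text_py title overview severity reason key_indicators steps automation_candidates analyst_notes → Spec_synthesize_playbook_report_text_py title overview severity reason key_indicators steps automation_candidates analyst_notes (synthesize_playbook_report_text_py title overview severity reason key_indicators steps automation_candidates analyst_notes)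

-- ===== LEMMAS AND PROOFS =====

-- The contribution of one step to phase `ph`.
def pvEntry (s : List (String × String)) (ph : String) : List String :=
  let d := PySem.Dict.ofList s
  if ((d.get? "phase").getD "") ≠ ph then []
  else
    let p := PySem.Str.strip ((d.get? "purpose").getD "")
    let a := PySem.Str.strip ((d.get? "action").getD "")
    if p ≠ "" ∧ a ≠ "" then [p ++ " (action: " ++ a ++ ")"]
    else if p ≠ "" then [p]
    else if a ≠ "" then [a]
    else []

lemma append_action_ne_empty (p a : String) : p ++ " (action: " ++ a ++ ")" ≠ "" := by
  intro h
  have h' := congrArg String.toList h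
  simp at h'

lemma pvByPhase_eq_flatMap (steps : List (List (String × String))) (ph : String) :
    pvByPhase steps ph = steps.flatMap (fun s => pvEntry s ph) := by
  unfold pvByPhase
  have hstep : (fun (out : List String) (s : List (String × String)) =>
        let d := PySem.Dict.ofList s
        if ((d.get? "phase").getD "") ≠ ph then out
        else
          let p := PySem.Str.strip ((d.get? "purpose").getD "")
          let a := PySem.Str.strip ((d.get? "action").getD "")
          if p ≠ "" ∧ a ≠ "" then out ++ [p ++ " (action: " ++ a ++ ")"]
          else if p ≠ "" then out ++ [p]
          else if a ≠ "" then out ++ [a]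
          else out)
      = fun out s => out ++ pvEntry s ph := by
    funext out s
    simp only [pvEntry]
    split_ifs <;> simp
  rw [hstep, PySem.List.foldl_append_eq_flatMap]
  simp

-- What one iteration of B's grouping recursion does to the bucket of `ph`.
lemma pvStep_getD (ph phv p a : String) (g : PySem.Dict String (List String)) :
    ((if (if p ≠ "" ∧ a ≠ "" then p ++ " (action: " ++ a ++ ")" else if p ≠ "" then p else a) ≠ ""
      then g.modify phv [] (· ++ [if p ≠ "" ∧ a ≠ "" then p ++ " (action: " ++ a ++ ")" else if p ≠ "" then p else a])
      else g).getD ph [])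
    = g.getD ph [] ++
      (if phv ≠ ph then []
       else if p ≠ "" ∧ a ≠ "" then [p ++ " (action: " ++ a ++ ")"]
       else if p ≠ "" then [p]
       else if a ≠ "" then [a]
       else []) := by
  by_cases hph : phv = ph
  · subst hph
    by_cases hpa : p ≠ "" ∧ a ≠ ""
    · rw [if_pos hpa, if_pos (append_action_ne_empty p a), PySem.Dict.getD_modify_self,
        if_neg (by simp), if_pos hpa]
    · rw [if_neg hpa]
      by_cases hp : p ≠ ""
      · rw [if_pos hp, if_pos hp, PySem.Dict.getD_modify_self, if_neg (by simp), if_neg hpa, if_pos hp]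
      · rw [if_neg hp]
        by_cases ha : a ≠ ""
        · rw [if_pos ha, PySem.Dict.getD_modify_self, if_neg (by simp), if_neg hpa, if_neg hp, if_pos ha]
        · rw [if_neg ha]
          simp [if_neg hpa, if_neg hp, if_neg ha]
  · rw [if_pos hph]
    have hne : ph ≠ phv := fun hc => hph hc.symm
    split_ifs <;> simp [PySem.Dict.getD_modify, hne]

set_option maxHeartbeats 1600000 in
lemma pvGroupRec_getD (ph : String) (steps : List (List (String × String)))
    (g : PySem.Dict String (List String)) :
    (pvGroupRec steps g).getD ph [] = g.getD ph [] ++ steps.flatMap (fun s => pvEntry s ph) := by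
  induction steps generalizing g with
  | nil => simp [pvGroupRec]
  | cons s t ih =>
      rw [pvGroupRec, ih, List.flatMap_cons, ← List.append_assoc]
      congr 1
      exact pvStep_getD ph (((PySem.Dict.ofList s).get? "phase").getD "")
        (PySem.Str.strip (((PySem.Dict.ofList s).get? "purpose").getD ""))
        (PySem.Str.strip (((PySem.Dict.ofList s).get? "action").getD "")) g

-- B's bucket for `ph` is exactly A's `_by_phase ph`.
lemma pvGroupRec_eq_byPhase (steps : List (List (String × String))) (ph : String) :
    (pvGroupRec steps PySem.Dict.empty).getD ph [] = pvByPhase steps ph := by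
  rw [pvByPhase_eq_flatMap, pvGroupRec_getD]
  simp [PySem.Dict.empty, PySem.Dict.getD, PySem.Dict.get?]

-- The nine report sections as (header, body-lines), with the four phase lists abstracted.
def pvSections (overview severity reason analyst_notes : String)
    (key_indicators automation_candidates inv con era rcv : List String) :
    List (String × List String) :=
  [("INCIDENT OVERVIEW", [if overview ≠ "" then overview else "(No overview text.)"]),
   ("RISK ASSESSMENT", ["Severity: " ++ (if severity ≠ "" then severity else "unknown"),
                        "Reason: " ++ (if reason ≠ "" then reason else "unknown")]),
   ("KEY INDICATORS", if key_indicators ≠ [] then key_indicators.map (fun k => "- " ++ k)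
                      else ["- (None listed)"]),
   ("INVESTIGATION STEPS", if inv ≠ [] then
        (PySem.List.enumerate inv 1).map (fun is => PySem.Int.toStr is.1 ++ ". " ++ is.2)
      else ["1. (No investigation steps.)"]),
   ("CONTAINMENT ACTIONS", (if con ≠ [] then con else ["(No containment actions.)"]).map (fun s => "- " ++ s)),
   ("ERADICATION ACTIONS", (if era ≠ [] then era else ["(No eradication actions.)"]).map (fun s => "- " ++ s)),
   ("RECOVERY STEPS", (if rcv ≠ [] then rcv else ["(No recovery steps.)"]).map (fun s => "- " ++ s)),
   ("AUTOMATION OPPORTUNITIES", if automation_candidates ≠ [] then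
        automation_candidates.map (fun a => "- " ++ a) else ["- (None listed)"]),
   ("ANALYST NOTES", [if analyst_notes ≠ "" then analyst_notes else "(None)"])]

-- A's imperative line building is the flattened section table, joined with newline.
set_option maxHeartbeats 1000000 in
lemma pvA_eq_flat (title overview severity reason analyst_notes : String)
    (key_indicators automation_candidates : List String) (steps : List (List (String × String))) :
    synthesize_playbook_report_text_py title overview severity reason key_indicators steps automation_candidates analyst_notes
    = PySem.Str.join "\n" (("SOC Incident Response Playbook: " ++ title) ::
        (pvSections overview severity reason analyst_notes key_indicators automation_candidates
          (pvByPhase steps "INVESTIGATION_STEPS") (pvByPhase steps "CONTAINMENT_ACTIONS")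
          (pvByPhase steps "ERADICATION_ACTIONS") (pvByPhase steps "RECOVERY_STEPS")).flatMap
          (fun hb => "" :: hb.1 :: hb.2)) := by
  unfold synthesize_playbook_report_text_py
  simp only [PySem.List.foldl_append_singleton_eq_map, pvSections, List.flatMap_cons,
    List.flatMap_nil]
  by_cases hki : key_indicators = [] <;>
    by_cases hinv : pvByPhase steps "INVESTIGATION_STEPS" = [] <;>
    by_cases hac : automation_candidates = [] <;>
    simp [hki, hinv, hac, List.append_assoc]

-- Every section body is a nonempty list of lines.
lemma pvSections_body_ne (overview severity reason analyst_notes : String)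
    (key_indicators automation_candidates inv con era rcv : List String) :
    ∀ b ∈ pvSections overview severity reason analyst_notes key_indicators automation_candidates
        inv con era rcv, b.2 ≠ [] := by
  intro b hb
  simp only [pvSections, List.mem_cons, List.not_mem_nil, or_false] at hb
  rcases hb with rfl | rfl | rfl | rfl | rfl | rfl | rfl | rfl | rfl <;>
    simp_all <;> split_ifs <;>
    simp_all [PySem.List.enumerate_eq_zipIdx_map, List.map_eq_nil_iff]

-- Joining the flat line list with '\n' equals joining whole section blocks with '\n\n'.
lemma pv_inter_cons (sep a : List Char) (l : List (List Char)) :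
    PySem.Chars.join sep (a :: l) = a ++ l.flatMap (fun x => sep ++ x) := by
  induction l generalizing a with
  | nil => simp [PySem.Chars.join, List.intercalate]
  | cons b t ih =>
      simp only [PySem.Chars.join, List.intercalate, List.intersperse] at ih ⊢
      simp [ih b]

lemma pv_chars_join2 (t : List Char) (S : List (List Char × List (List Char)))
    (h : ∀ b ∈ S, b.2 ≠ []) :
    PySem.Chars.join ['\n'] (t :: S.flatMap (fun hb => [] :: hb.1 :: hb.2))
    = PySem.Chars.join ['\n', '\n'] (t :: S.map (fun hb => hb.1 ++ '\n' :: PySem.Chars.join ['\n'] hb.2)) := by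
  rw [pv_inter_cons, pv_inter_cons]
  congr 1
  induction S with
  | nil => simp
  | cons hb S ih =>
      obtain ⟨H, body⟩ := hb
      obtain ⟨c, cs, rfl⟩ : ∃ c cs, body = c :: cs := by
        rcases body with _ | ⟨c, cs⟩
        · exact absurd rfl (h (H, []) (by simp))
        · exact ⟨c, cs, rfl⟩
      rw [List.flatMap_cons, List.map_cons, List.flatMap_cons, List.flatMap_append,
        ih (fun b hb => h b (List.mem_cons_of_mem _ hb))]
      congr 1
      rw [pv_inter_cons]
      simp

lemma pv_join2_eq (t : String) (S : List (String × List String)) (h : ∀ b ∈ S, b.2 ≠ []) :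
    PySem.Str.join "\n" (t :: S.flatMap (fun hb => "" :: hb.1 :: hb.2))
    = PySem.Str.join "\n\n" (t :: S.map (fun hb => hb.1 ++ "\n" ++ PySem.Str.join "\n" hb.2)) := by
  apply String.toList_inj.mp
  rw [PySem.Str.toList_join, PySem.Str.toList_join]
  have hmap1 : (S.flatMap (fun hb => "" :: hb.1 :: hb.2)).map String.toList
      = (S.map (fun hb => (hb.1.toList, hb.2.map String.toList))).flatMap (fun hb => [] :: hb.1 :: hb.2) := by
    rw [List.map_flatMap, List.flatMap_map]
    simp
  have hmap2 : (S.map (fun hb => hb.1 ++ "\n" ++ PySem.Str.join "\n" hb.2)).map String.toList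
      = (S.map (fun hb => (hb.1.toList, hb.2.map String.toList))).map
          (fun hb => hb.1 ++ '\n' :: PySem.Chars.join ['\n'] hb.2) := by
    rw [List.map_map, List.map_map]
    congr 1; funext hb
    simp [PySem.Str.toList_join]
  rw [List.map_cons, List.map_cons, hmap1, hmap2]
  exact pv_chars_join2 t.toList _ (by
    intro b hb
    simp only [List.mem_map] at hb
    obtain ⟨x, hx, rfl⟩ := hb
    simp only [ne_eq, List.map_eq_nil_iff]
    exact h x hx)

lemma pv_join_singleton (x : String) : PySem.Str.join "\n" [x] = x := by
  simp [PySem.Str.join, PySem.Chars.join, List.intercalate]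

lemma pv_join_pair (x y : String) : PySem.Str.join "\n" [x, y] = x ++ "\n" ++ y := by
  apply String.toList_inj.mp
  simp [PySem.Str.toList_join, PySem.Chars.join, List.intercalate, List.intersperse]

lemma pvBullets_eq_if (items : List String) (empty : String) :
    pvBullets items empty
    = PySem.Str.join "\n" ((if items ≠ [] then items else [empty]).map (fun x => "- " ++ x)) := by
  cases items <;> simp [pvBullets]

-- B's blocks are the section table mapped to header ++ '\n' ++ joined body.
set_option maxHeartbeats 1000000 in
lemma pvAlt_eq_sections (title overview severity reason analyst_notes : String)
    (key_indicators automation_candidates : List String) (steps : List (List (String × String))) :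
    synthesize_playbook_report_text_py_alt title overview severity reason key_indicators steps automation_candidates analyst_notes
    = PySem.Str.join "\n\n" (("SOC Incident Response Playbook: " ++ title) ::
        (pvSections overview severity reason analyst_notes key_indicators automation_candidates
          (pvByPhase steps "INVESTIGATION_STEPS") (pvByPhase steps "CONTAINMENT_ACTIONS")
          (pvByPhase steps "ERADICATION_ACTIONS") (pvByPhase steps "RECOVERY_STEPS")).map
          (fun hb => hb.1 ++ "\n" ++ PySem.Str.join "\n" hb.2)) := by
  unfold synthesize_playbook_report_text_py_alt
  simp only [pvGroupRec_eq_byPhase]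
  congr 1
  simp only [pvSections, List.map_cons, List.map_nil, pvBullets_eq_if]
  simp only [apply_ite (PySem.Str.join "\n"), pv_join_singleton, pv_join_pair]
  simp only [String.append_assoc]

-- ===== VERDICT (by name: the statement is the Claim_ definition above) =====
theorem synthesize_playbook_report_text_py_spec : Claim_equal_synthesize_playbook_report_text_py := by
  intro title overview severity reason key_indicators steps automation_candidates analyst_notes _
  unfold Spec_synthesize_playbook_report_text_py
  rw [pvA_eq_flat, pvAlt_eq_sections]
  exact pv_join2_eq _ _ (pvSections_body_ne _ _ _ _ _ _ _ _ _ _)
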